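-- pv_equiv track=rewrite | github.com/geethsai0507/sloth_byte_challenges | remove_last_vowel.py | removeLastVowel
-- ===== SOURCE A (Python) =====
-- def removeLastVowel(txt: str) -> str :
--     x = txt.split()
--     update = []
--
--     for i in range(len(x)):
--         temp = x[i]
--         for j in range(len(temp) - 1, -1, -1):
--             if temp[j].lower() == 'e':
--                 temp = temp[:j] + temp[j+1:]
--                 update.append(temp)
--                 break
--             elif temp[j].lower() == 'a':
--                 temp = temp[:j] + temp[j+1:]
--                 update.append(temp)
--                 break
--             elif temp[j].lower() == 'i':
--                 temp = temp[:j] + temp[j+1:]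
--                 update.append(temp)
--                 break
--             elif temp[j].lower() == 'o':
--                 temp = temp[:j] + temp[j+1:]
--                 update.append(temp)
--                 break
--             elif temp[j].lower() == 'u':
--                 temp = temp[:j] + temp[j+1:]
--                 update.append(temp)
--                 break
--             else:
--                 continue
--
--     sep = ' '
--     new = sep.join(update)
--     return new
-- ===== SOURCE B (Python) =====
-- def removeLastVowel(txt: str) -> str:
--     out = []
--     for word in txt.split():
--         rev = []
--         removed = False
--         for ch in reversed(word):
--             if not removed and ch.lower() in 'aeiou':
--                 removed = True
--             else:
--                 rev.append(ch)
--         if removed: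
--             out.append(''.join(reversed(rev)))
--     return ' '.join(out)
-- ===== Notes on version B (the rewrite author's own statement) =====
-- stated objective: simpler
-- what changed: Replaces A's indexed backward scan with a five-branch elif chain and slice surgery per word by a single pass over the reversed word that skips the first vowel seen and rebuilds the word without indices or slicing.
import Mathlib
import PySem

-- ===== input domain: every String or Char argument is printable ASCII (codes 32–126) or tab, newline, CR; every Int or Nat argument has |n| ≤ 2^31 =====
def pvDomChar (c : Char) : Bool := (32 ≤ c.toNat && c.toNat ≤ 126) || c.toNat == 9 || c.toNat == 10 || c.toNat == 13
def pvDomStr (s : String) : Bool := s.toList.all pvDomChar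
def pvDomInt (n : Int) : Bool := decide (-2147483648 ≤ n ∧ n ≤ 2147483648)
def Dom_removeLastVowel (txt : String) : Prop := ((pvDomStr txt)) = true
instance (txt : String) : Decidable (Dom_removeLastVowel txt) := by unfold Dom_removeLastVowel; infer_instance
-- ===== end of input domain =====

-- B removes the last vowel of each word by one pass over the reversed word (no indices, no slicing); simpler, same cost.

-- ===== PORT A =====
-- temp[:j] + temp[j+1:]
def cutA (temp : List Char) (j : Nat) : List Char :=
  PySem.List.slice temp none (some (j : Int)) ++ PySem.List.slice temp (some ((j : Int) + 1)) none

-- one iteration of the inner loop's body at index j: A's five-branch elif chain;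
-- some = 'break' was taken (with the appended value), none = 'continue'
def hitA (temp : List Char) (j : Nat) : Option (List Char) :=
  let c := PySem.Chars.lowerChar (PySem.List.pyGetD temp (j : Int) ' ')
  if c = 'e' then some (cutA temp j)
  else if c = 'a' then some (cutA temp j)
  else if c = 'i' then some (cutA temp j)
  else if c = 'o' then some (cutA temp j)
  else if c = 'u' then some (cutA temp j)
  else none

-- the inner 'for j in range(len(temp)-1, -1, -1)' loop, as downward recursion on j;
-- none = the loop fell through with no break (nothing appended)
def innerA (temp : List Char) : Nat → Option (List Char)
  | 0 =>
    hitA temp 0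
  | j + 1 =>
    match hitA temp (j + 1) with
    | some t => some t
    | none => innerA temp j

def removeLastVowel (txt : String) : String :=
  let x := PySem.Chars.split₀ txt.toList
  let update :=
    (PySem.List.pyRange 0 (x.length : Int) 1).foldl (fun acc i =>
      let temp := PySem.List.pyGetD x i []
      match temp.length with
      | 0 => acc                       -- empty word: the inner range is empty, nothing appended
      | n + 1 =>
        match innerA temp n with
        | some t => acc ++ [t]
        | none => acc) []
  String.ofList (PySem.Chars.join [' '] update)

-- ===== PORT B =====
-- one step of the pass over the reversed word: (removed?, chars kept so far, reversed)
def stepB (s : Bool × List Char) (ch : Char) : Bool × List Char :=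
  if !s.1 && ['a', 'e', 'i', 'o', 'u'].contains (PySem.Chars.lowerChar ch) then (true, s.2)
  else (s.1, s.2 ++ [ch])

def removeLastVowel_alt (txt : String) : String :=
  let out := (PySem.Chars.split₀ txt.toList).foldl (fun acc word =>
    let p := word.reverse.foldl stepB (false, [])
    if p.1 then acc ++ [p.2.reverse] else acc) []
  String.ofList (PySem.Chars.join [' '] out)

-- ===== PRECONDITION & SPEC =====
def Spec_removeLastVowel (txt : String) (out : String) : Prop := out = removeLastVowel_alt txt
instance (txt : String) (out : String) : Decidable (Spec_removeLastVowel txt out) := by unfold Spec_removeLastVowel; infer_instance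

-- ===== CLAIM (what is proved, stated in full; the proofs are below) =====
def Claim_equal_removeLastVowel : Prop := ∀ (txt : String), Dom_removeLastVowel txt → Spec_removeLastVowel txt (removeLastVowel txt)

-- ===== LEMMAS AND PROOFS =====

-- A's five-branch elif chain is membership of the lowered character in the vowel list
lemma hitA_eq (temp : List Char) (j : Nat) :
    hitA temp j =
      (if ['a', 'e', 'i', 'o', 'u'].contains
            (PySem.Chars.lowerChar (PySem.List.pyGetD temp (j : Int) ' ')) = true then
        some (cutA temp j)
      else none) := by
  unfold hitA
  set c := PySem.Chars.lowerChar (PySem.List.pyGetD temp (j : Int) ' ') with hc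
  by_cases h : (['a', 'e', 'i', 'o', 'u'].contains c) = true
  · simp only [h, if_true]
    simp only [List.contains_eq_mem, decide_eq_true_eq, List.mem_cons, List.not_mem_nil, or_false] at h
    rcases h with h | h | h | h | h <;> simp [h]
  · simp only [h]
    simp only [List.contains_eq_mem, decide_eq_true_eq, List.mem_cons, List.not_mem_nil, or_false, not_or] at h
    simp [h.1, h.2.1, h.2.2.1, h.2.2.2.1, h.2.2.2.2]

lemma pyGetD_append_lt (u : List Char) (c : Char) (j : Nat) (hj : j < u.length) :
    PySem.List.pyGetD (u ++ [c]) (j : Int) ' ' = PySem.List.pyGetD u (j : Int) ' ' := by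
  rw [PySem.List.pyGetD_natCast, PySem.List.pyGetD_natCast]
  rw [List.getD_append _ _ _ _ hj]

lemma pyGetD_append_self (u : List Char) (c : Char) :
    PySem.List.pyGetD (u ++ [c]) ((u.length : Nat) : Int) ' ' = c := by
  rw [PySem.List.pyGetD_natCast]
  simp

-- removing at an index inside u leaves a right-appended character in place
lemma cutA_append (u : List Char) (c : Char) (j : Nat) (hj : j < u.length) :
    cutA (u ++ [c]) j = cutA u j ++ [c] := by
  unfold cutA
  rw [show ((j : Int) + 1) = ((j + 1 : Nat) : Int) by push_cast; ring]
  rw [PySem.List.slice_to_natCast, PySem.List.slice_to_natCast,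
    PySem.List.slice_from_natCast, PySem.List.slice_from_natCast]
  rw [List.take_append_of_le_length (by omega), List.drop_append_of_le_length (by omega)]
  rw [List.append_assoc]

-- removing at the top index of u ++ [c] removes c itself
lemma cutA_append_top (u : List Char) (c : Char) :
    cutA (u ++ [c]) u.length = u := by
  unfold cutA
  rw [show ((u.length : Int) + 1) = ((u.length + 1 : Nat) : Int) by push_cast; ring]
  rw [PySem.List.slice_to_natCast, PySem.List.slice_from_natCast]
  simp

-- appending a character on the right leaves the search below it untouched (modulo the suffix)
lemma innerA_append (u : List Char) (c : Char) (j : Nat) (hj : j < u.length) :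
    innerA (u ++ [c]) j = (innerA u j).map (· ++ [c]) := by
  induction j with
  | zero =>
    show hitA (u ++ [c]) 0 = (hitA u 0).map (· ++ [c])
    rw [hitA_eq, hitA_eq, pyGetD_append_lt u c 0 hj]
    split
    · rw [cutA_append u c 0 hj]; rfl
    · rfl
  | succ j' ih =>
    show (match hitA (u ++ [c]) (j' + 1) with
          | some t => some t
          | none => innerA (u ++ [c]) j') =
        (match hitA u (j' + 1) with
          | some t => some t
          | none => innerA u j').map (· ++ [c])
    rw [hitA_eq, hitA_eq, pyGetD_append_lt u c (j' + 1) hj]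
    by_cases h : (['a', 'e', 'i', 'o', 'u'].contains
        (PySem.Chars.lowerChar (PySem.List.pyGetD u ((j' + 1 : Nat) : Int) ' '))) = true
    · rw [if_pos h, if_pos h, cutA_append u c (j' + 1) hj]; rfl
    · rw [if_neg h, if_neg h]
      exact ih (by omega)

-- once the vowel is removed, B's pass just copies the rest
lemma foldl_stepB_true (l a : List Char) :
    l.foldl stepB (true, a) = (true, a ++ l) := by
  induction l generalizing a with
  | nil => simp
  | cons x xs ih => simp [stepB, ih]

-- characters already kept are a passive prefix of B's accumulator
lemma foldl_stepB_prefix (l p a : List Char) (b : Bool) :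
    l.foldl stepB (b, p ++ a) =
      ((l.foldl stepB (b, a)).1, p ++ (l.foldl stepB (b, a)).2) := by
  induction l generalizing b a with
  | nil => simp
  | cons x xs ih =>
    simp only [List.foldl_cons, stepB]
    by_cases h : (!b && ['a', 'e', 'i', 'o', 'u'].contains (PySem.Chars.lowerChar x)) = true
    · simp only [h, if_true]
      exact ih a true
    · simp only [h]
      rw [List.append_assoc]
      exact ih (a ++ [x]) b

-- per-word result of B as an Option, shaped like A's inner loop result
def wordB (w : List Char) : Option (List Char) :=
  let p := w.reverse.foldl stepB (false, [])
  if p.1 then some p.2.reverse else none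

-- the heart of the file: A's backward indexed scan and B's reversed pass agree on every word
lemma inner_eq_wordB (w : List Char) :
    (match w.length with
      | 0 => none
      | n + 1 => innerA w n) = wordB w := by
  induction w using List.reverseRecOn with
  | nil => simp [wordB]
  | append_singleton u c ih =>
    have hlen : (u ++ [c]).length = u.length + 1 := by simp
    rw [hlen]
    have hrev : (u ++ [c]).reverse = c :: u.reverse := by simp
    by_cases hv : (['a', 'e', 'i', 'o', 'u'].contains (PySem.Chars.lowerChar c)) = true
    -- the appended character is a vowel: A breaks at the top index, B removes it at once
    · have hhit : hitA (u ++ [c]) u.length = some u := by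
        rw [hitA_eq, pyGetD_append_self, if_pos hv, cutA_append_top]
      have hA : innerA (u ++ [c]) u.length = some u := by
        cases hu : u.length with
        | zero => show hitA (u ++ [c]) 0 = some u; rw [← hu]; exact hhit
        | succ m =>
          show (match hitA (u ++ [c]) (m + 1) with
                | some t => some t
                | none => innerA (u ++ [c]) m) = some u
          rw [← hu, hhit]
      show innerA (u ++ [c]) u.length = wordB (u ++ [c])
      rw [hA]
      have hstep : stepB (false, []) c = (true, []) := by
        unfold stepB
        simp only [Bool.not_false, Bool.true_and]
        rw [if_pos hv]
      simp only [wordB, hrev, List.foldl_cons, hstep, foldl_stepB_true]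
      simp
    -- not a vowel: both skip c and work on u; the suffix [c] is carried along
    · have hhit : hitA (u ++ [c]) u.length = none := by
        rw [hitA_eq, pyGetD_append_self, if_neg hv]
      have hstep : stepB (false, []) c = (false, [c]) := by
        unfold stepB
        simp only [Bool.not_false, Bool.true_and]
        rw [if_neg hv]
        rfl
      have hpre := foldl_stepB_prefix u.reverse [c] [] false
      simp only [List.append_nil] at hpre
      show innerA (u ++ [c]) u.length = wordB (u ++ [c])
      cases hu : u.length with
      | zero =>
        have hu0 : u = [] := List.eq_nil_of_length_eq_zero hu
        subst hu0
        show hitA ([] ++ [c]) 0 = wordB ([] ++ [c])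
        rw [show (0 : Nat) = ([] : List Char).length from rfl, hhit]
        simp only [wordB, hrev, List.foldl_cons, hstep]
        simp
      | succ m =>
        rw [hu] at hhit ih
        show (match hitA (u ++ [c]) (m + 1) with
              | some t => some t
              | none => innerA (u ++ [c]) m) = wordB (u ++ [c])
        rw [hhit]
        show innerA (u ++ [c]) m = wordB (u ++ [c])
        have ih' : innerA u m = wordB u := ih
        rw [innerA_append u c m (by omega), ih']
        simp only [wordB, hrev, List.foldl_cons, hstep, hpre]
        cases hr : (u.reverse.foldl stepB (false, ([] : List Char))).1 <;> simp

-- ===== VERDICT (by name: the statement is the Claim_ definition above) =====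
theorem removeLastVowel_spec : Claim_equal_removeLastVowel := by
  intro txt _
  unfold Spec_removeLastVowel
  show removeLastVowel txt = removeLastVowel_alt txt
  unfold removeLastVowel removeLastVowel_alt
  simp only []
  congr 2
  rw [PySem.List.foldl_pyRange_zero_pyGetD' (PySem.Chars.split₀ txt.toList) []
      (fun acc temp =>
        match temp.length with
        | 0 => acc
        | n + 1 =>
          match innerA temp n with
          | some t => acc ++ [t]
          | none => acc) []]
  apply PySem.List.foldl_congr_mem
  intro acc w _
  have h := inner_eq_wordB w
  simp only [wordB] at h
  cases hw : w.length with
  | zero =>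
    rw [hw] at h
    cases hr : (List.foldl stepB (false, ([] : List Char)) w.reverse).1
    · simp
    · rw [hr] at h; simp at h
  | succ n =>
    rw [hw] at h
    cases hr : (List.foldl stepB (false, ([] : List Char)) w.reverse).1
    · rw [hr] at h
      simp only [Bool.false_eq_true, if_false] at h
      simp [h]
    · rw [hr] at h
      simp only [if_true] at h
      simp [h]
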